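-- pv_equiv track=rewrite | github.com/timofeevAS/ga-spbstu | utils/tsp.py | generate_ordinal_tour
-- ===== SOURCE A (Python) =====
-- from typing import List, Optional, Tuple
--
-- def generate_ordinal_tour(route: List[int], original_order: List[int]) -> List[int]:
--     ordinal_tour = []
--     remaining_nodes = original_order.copy()
--
--     for node in route:
--         index = remaining_nodes.index(node)
--         ordinal_tour.append(index)
--
--         remaining_nodes.pop(index)
--
--     return ordinal_tour
-- ===== SOURCE B (Python) =====
-- from typing import List
--
-- def generate_ordinal_tour(route: List[int], original_order: List[int]) -> List[int]:
--     # Precompute, per value, the queue of its positions in original_order;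
--     # match each route element to its next position, and convert that absolute
--     # position to a shrinking index by discounting already-removed positions,
--     # kept in a sorted list probed by binary search.
--     positions = {}
--     for i, v in enumerate(original_order):
--         positions.setdefault(v, []).append(i)
--     taken = {}
--     removed = []  # sorted list of removed positions
--     ordinal_tour = []
--     for node in route:
--         c = taken.get(node, 0)
--         taken[node] = c + 1
--         p = positions[node][c]
--         lo, hi = 0, len(removed)
--         while lo < hi:
--             mid = (lo + hi) // 2
--             if removed[mid] < p:
--                 lo = mid + 1
--             else:
--                 hi = mid
--         ordinal_tour.append(p - lo)
--         removed.insert(lo, p)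
--     return ordinal_tour
-- ===== Notes on version B (the rewrite author's own statement) =====
-- stated objective: faster
-- what changed: Instead of maintaining a shrinking copy of original_order and calling .index/.pop on it, B precomputes a dict mapping each value to the queue of its positions in original_order, matches each route element to its next absolute position, and converts it to a shrinking index by subtracting the number of already-removed positions below it, found by hand-written binary search in a sorted list of removed positions.
import Mathlib
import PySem

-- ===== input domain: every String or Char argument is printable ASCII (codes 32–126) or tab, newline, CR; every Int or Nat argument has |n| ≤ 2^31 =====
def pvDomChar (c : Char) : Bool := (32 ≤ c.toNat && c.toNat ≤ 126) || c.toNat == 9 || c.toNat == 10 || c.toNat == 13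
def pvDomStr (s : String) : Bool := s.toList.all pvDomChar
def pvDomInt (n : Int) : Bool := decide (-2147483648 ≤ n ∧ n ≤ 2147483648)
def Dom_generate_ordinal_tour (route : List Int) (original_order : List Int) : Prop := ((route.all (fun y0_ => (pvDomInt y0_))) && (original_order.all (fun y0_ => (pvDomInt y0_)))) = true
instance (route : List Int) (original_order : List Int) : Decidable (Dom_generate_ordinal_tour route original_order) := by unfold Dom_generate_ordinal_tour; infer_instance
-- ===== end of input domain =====

-- B replaces the shrinking-list .index/.pop scan by precomputed per-value position queues plus a
-- binary search over a sorted list of removed positions (measurably faster at large sizes).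

-- ===== PORT A =====
def generate_ordinal_tour (route : List Int) (original_order : List Int) : List Int :=
  (route.foldl
    (fun (st : List Int × List Int) node =>
      let index := (PySem.List.index? st.2 node).getD 0
      (st.1 ++ [(index : Int)],
       ((PySem.List.pop? st.2 (index : Int)).map Prod.snd).getD st.2))
    ([], original_order)).1

-- ===== PORT B =====
-- helper for port B: the hand-written binary-search loop of Source B (lo, hi are nonnegative
-- Python ints there, so Nat arithmetic and Nat division coincide with Python's `//`; exact)
def pvBisect (removed : List Int) (p : Int) (lo hi : Nat) : Nat :=
  if _h : lo < hi then
    let mid := (lo + hi) / 2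
    if PySem.List.pyGetD removed (mid : Int) 0 < p then pvBisect removed p (mid + 1) hi
    else pvBisect removed p lo mid
  else lo
termination_by hi - lo
decreasing_by all_goals omega

def generate_ordinal_tour_alt (route : List Int) (original_order : List Int) : List Int :=
  let positions : PySem.Dict Int (List Int) :=
    (PySem.List.enumerate original_order 0).foldl
      (fun d iv => d.modify iv.2 [] (· ++ [iv.1])) PySem.Dict.empty
  (route.foldl
    (fun (st : List Int × PySem.Dict Int Int × List Int) node =>
      let c := st.2.1.getD node 0
      let taken := st.2.1.insert node (c + 1)
      let p := PySem.List.pyGetD (positions.getD node []) c 0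
      let lo := pvBisect st.2.2 p 0 st.2.2.length
      (st.1 ++ [p - (lo : Int)],
       taken,
       PySem.List.insert st.2.2 (lo : Int) p))
    ([], PySem.Dict.empty, [])).1

-- ===== PRECONDITION & SPEC =====
-- Pre_ excludes exactly the inputs where A raises ValueError (a route element occurs more
-- often than in original_order, so .index fails at some step); B raises there too.
def Pre_generate_ordinal_tour (route : List Int) (original_order : List Int) : Prop :=
  ∀ x ∈ route, route.count x ≤ original_order.count x
instance (route : List Int) (original_order : List Int) : Decidable (Pre_generate_ordinal_tour route original_order) := by unfold Pre_generate_ordinal_tour; infer_instance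

def pvWitness_generate_ordinal_tour : List Int × List Int := ([2, 1, 3], [1, 2, 3])

def Spec_generate_ordinal_tour (route : List Int) (original_order : List Int) (out : List Int) : Prop := out = generate_ordinal_tour_alt route original_order
instance (route : List Int) (original_order : List Int) (out : List Int) : Decidable (Spec_generate_ordinal_tour route original_order out) := by unfold Spec_generate_ordinal_tour; infer_instance

-- ===== CLAIM (what is proved, stated in full; the proofs are below) =====
def Claim_equal_generate_ordinal_tour : Prop := ∀ (route : List Int) (original_order : List Int), Dom_generate_ordinal_tour route original_order → Pre_generate_ordinal_tour route original_order → Spec_generate_ordinal_tour route original_order (generate_ordinal_tour route original_order)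

-- ===== LEMMAS AND PROOFS =====

def pvStepA (st : List Int × List Int) (node : Int) : List Int × List Int :=
  let index := (PySem.List.index? st.2 node).getD 0
  (st.1 ++ [(index : Int)],
   ((PySem.List.pop? st.2 (index : Int)).map Prod.snd).getD st.2)

def pvPosDict (original_order : List Int) : PySem.Dict Int (List Int) :=
  (PySem.List.enumerate original_order 0).foldl
    (fun d iv => d.modify iv.2 [] (· ++ [iv.1])) PySem.Dict.empty

def pvStepB (positions : PySem.Dict Int (List Int))
    (st : List Int × PySem.Dict Int Int × List Int) (node : Int) :
    List Int × PySem.Dict Int Int × List Int :=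
  let c := st.2.1.getD node 0
  let taken := st.2.1.insert node (c + 1)
  let p := PySem.List.pyGetD (positions.getD node []) c 0
  let lo := pvBisect st.2.2 p 0 st.2.2.length
  (st.1 ++ [p - (lo : Int)],
   taken,
   PySem.List.insert st.2.2 (lo : Int) p)

lemma pvPosDict_getD (orig : List Int) (v : Int) :
    (pvPosDict orig).getD v []
      = ((PySem.List.enumerate orig 0).filter (fun q => q.2 == v)).map (·.1) := by
  have h1 : pvPosDict orig
      = ((PySem.List.enumerate orig 0).map Prod.swap).foldl
        (fun d p => d.modify p.1 [] (· ++ [p.2])) PySem.Dict.empty := by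
    unfold pvPosDict
    rw [List.foldl_map]
    rfl
  rw [h1, PySem.Dict.getD_foldl_modify_append]
  rw [List.filter_map, List.map_map]
  simp [PySem.Dict.getD_empty, Function.comp_def, Prod.swap]

lemma pvCountRangeLt (N k : Nat) (h : k ≤ N) : (List.range N).countP (fun j => decide (j < k)) = k := by
  rw [List.countP_eq_length_filter]
  induction N with
  | zero => simp; omega
  | succ n ih =>
    rw [List.range_succ, List.filter_append]
    by_cases hk : k ≤ n
    · have := ih hk
      simp only [List.length_append, this, List.filter_cons, List.filter_nil]
      have : ¬ n < k := by omega
      simp [this]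
    · have hk1 : k = n + 1 := by omega
      subst hk1
      have hall : (List.range n).filter (fun j => decide (j < n+1)) = List.range n := by
        apply List.filter_eq_self.mpr
        intro a ha
        simp only [List.mem_range] at ha
        simp; omega
      rw [hall] at *
      simp only [List.filter_cons]
      simp

lemma pvCountEnumLt (xs : List Int) (k : Nat) (h : k ≤ xs.length) :
    (PySem.List.enumerate xs 0).countP (fun q => decide (q.1 < (k : Int))) = k := by
  have h1 : (PySem.List.enumerate xs 0).countP (fun q => decide (q.1 < (k : Int)))
      = ((PySem.List.enumerate xs 0).map (·.1)).countP (fun j => decide (j < (k : Int))) := by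
    rw [List.countP_map]; rfl
  rw [h1, PySem.List.map_fst_enumerate]
  simp only [zero_add]
  rw [PySem.List.pyRange_one, List.countP_map]
  simp only [Int.sub_zero, Int.toNat_natCast]
  have h2 : (List.range xs.length).countP
        ((fun j => decide (j < (k : Int))) ∘ fun (j : Nat) => (0 : Int) + (j : Int))
      = (List.range xs.length).countP (fun j => decide (j < k)) := by
    apply List.countP_congr
    intro j _
    simp [Function.comp]
  rw [h2]
  exact pvCountRangeLt _ _ h

lemma pvCountOrig (orig : List Int) (v : Int) :
    orig.count v = ((PySem.List.enumerate orig 0).filter (fun q => q.2 == v)).length := by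
  rw [← List.countP_eq_length_filter]
  have h1 : (PySem.List.enumerate orig 0).countP (fun q => q.2 == v)
      = ((PySem.List.enumerate orig 0).map (·.2)).countP (fun x => x == v) := by
    rw [List.countP_map]; rfl
  rw [h1, PySem.List.map_snd_enumerate, List.count]

lemma pvEraseIdxAppend {α β : Type} (f : α → β) (l₁ l₂ : List α) (y : β) :
    (l₁.map f ++ y :: l₂.map f).eraseIdx l₁.length = l₁.map f ++ l₂.map f := by
  induction l₁ with
  | nil => rfl
  | cons a t ih => simpa using ih

lemma pvSortedSplit (r : List Int) (p : Int) (hs : r.Pairwise (· ≤ ·)) :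
    (∀ i (h : i < r.length), i < r.countP (fun x => decide (x < p)) → r[i] < p) ∧
    (∀ i (h : i < r.length), r.countP (fun x => decide (x < p)) ≤ i → ¬ r[i] < p) := by
  induction r with
  | nil => simp
  | cons x t ih =>
    rw [List.pairwise_cons] at hs
    obtain ⟨hx, ht⟩ := hs
    obtain ⟨ih1, ih2⟩ := ih ht
    by_cases hxp : x < p
    · have hd : (decide (x < p)) = true := by simpa using hxp
      constructor
      · intro i h hi
        rw [List.countP_cons, hd, if_pos rfl] at hi
        cases i with
        | zero => simpa using hxp
        | succ j =>
          simp only [List.getElem_cons_succ]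
          exact ih1 j (by simpa using h) (by omega)
      · intro i h hi
        rw [List.countP_cons, hd, if_pos rfl] at hi
        cases i with
        | zero => omega
        | succ j =>
          simp only [List.getElem_cons_succ]
          exact ih2 j (by simpa using h) (by omega)
    · have hc : (x :: t).countP (fun x => decide (x < p)) = 0 := by
        rw [List.countP_eq_zero]
        intro a ha
        rcases List.mem_cons.mp ha with h1 | h1
        · subst h1; simpa using hxp
        · have := hx a h1
          simp only [decide_eq_true_eq]
          omega
      rw [hc]
      constructor
      · intro i h hi; omega
      · intro i h _
        cases i with
        | zero => simpa using hxp
        | succ j =>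
          have hj : j < t.length := by simpa using h
          have := hx t[j] (List.getElem_mem hj)
          simp only [List.getElem_cons_succ]
          omega

lemma pvBisect_stop (removed : List Int) (p : Int) (hs : removed.Pairwise (· ≤ ·))
    (lo : Nat) (hlo : lo ≤ removed.length)
    (hlow : ∀ i (h : i < removed.length), i < lo → removed[i] < p)
    (hhigh : ∀ i (h : i < removed.length), lo ≤ i → ¬ removed[i] < p) :
    lo = removed.countP (fun x => decide (x < p)) := by
  obtain ⟨hsp1, hsp2⟩ := pvSortedSplit removed p hs
  have hcle : removed.countP (fun x => decide (x < p)) ≤ removed.length :=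
    List.countP_le_length
  by_contra hne
  rcases Nat.lt_or_ge lo (removed.countP (fun x => decide (x < p))) with hlt | hge
  · have h1 : lo < removed.length := by omega
    exact hhigh lo h1 (le_refl _) (hsp1 lo h1 hlt)
  · have hlt : removed.countP (fun x => decide (x < p)) < lo := by omega
    have h1 : removed.countP (fun x => decide (x < p)) < removed.length := by omega
    exact hsp2 _ h1 (le_refl _) (hlow _ h1 hlt)

lemma pvBisect_eq (removed : List Int) (p : Int) (hs : removed.Pairwise (· ≤ ·)) :
    ∀ (n lo hi : Nat), hi - lo ≤ n → lo ≤ hi → hi ≤ removed.length →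
    (∀ i (h : i < removed.length), i < lo → removed[i] < p) →
    (∀ i (h : i < removed.length), hi ≤ i → ¬ removed[i] < p) →
    pvBisect removed p lo hi = removed.countP (fun x => decide (x < p)) := by
  intro n
  induction n with
  | zero =>
    intro lo hi hfuel hlohi hhi hlow hhigh
    have heq : lo = hi := by omega
    subst heq
    rw [pvBisect]
    simp only [lt_irrefl, dite_false]
    exact pvBisect_stop removed p hs lo hhi hlow hhigh
  | succ m ih =>
    intro lo hi hfuel hlohi hhi hlow hhigh
    by_cases h : lo < hi
    · rw [pvBisect, dif_pos h]
      have hmidlt : (lo + hi) / 2 < removed.length := by omega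
      have hget : PySem.List.pyGetD removed (((lo + hi) / 2 : Nat) : Int) 0
          = removed[(lo + hi) / 2] := by
        rw [PySem.List.pyGetD_natCast, List.getD_eq_getElem _ _ hmidlt]
      simp only [hget]
      by_cases hmp : removed[(lo + hi) / 2] < p
      · rw [if_pos hmp]
        apply ih ((lo + hi) / 2 + 1) hi (by omega) (by omega) hhi
        · intro i hil hi2
          rcases Nat.lt_or_ge i lo with h3 | h3
          · exact hlow i hil h3
          · have hle : removed[i] ≤ removed[(lo + hi) / 2] := by
              rcases Nat.eq_or_lt_of_le (Nat.le_of_lt_succ hi2) with he | hl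
              · subst he; exact le_refl _
              · exact (List.pairwise_iff_getElem.mp hs) i _ hil hmidlt hl
            omega
        · exact hhigh
      · rw [if_neg hmp]
        apply ih lo ((lo + hi) / 2) (by omega) (by omega) (by omega) hlow
        intro i hil hi2
        have hle : removed[(lo + hi) / 2] ≤ removed[i] := by
          rcases Nat.eq_or_lt_of_le hi2 with he | hl
          · subst he; exact le_refl _
          · exact (List.pairwise_iff_getElem.mp hs) _ i hmidlt hil hl
        omega
    · have heq : lo = hi := by omega
      subst heq
      rw [pvBisect]
      simp only [lt_irrefl, dite_false]
      exact pvBisect_stop removed p hs lo hhi hlow hhigh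

lemma pvBisect_full (removed : List Int) (p : Int) (hs : removed.Pairwise (· ≤ ·)) :
    pvBisect removed p 0 removed.length = removed.countP (fun x => decide (x < p)) := by
  apply pvBisect_eq removed p hs removed.length 0 removed.length (by omega) (by omega) (le_refl _)
  · intro i _ h2; omega
  · intro i h h2; omega

lemma pvInsertSorted (removed : List Int) (p : Int) (hs : removed.Pairwise (· ≤ ·)) :
    (removed.take (removed.countP (fun x => decide (x < p)))
      ++ p :: removed.drop (removed.countP (fun x => decide (x < p)))).Pairwise (· ≤ ·) := by
  obtain ⟨hsp1, hsp2⟩ := pvSortedSplit removed p hs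
  set L := removed.countP (fun x => decide (x < p)) with hL
  have htk : ∀ a ∈ removed.take L, a ≤ p := by
    intro a ha
    obtain ⟨i, hi, hval⟩ := List.getElem_of_mem ha
    have hiL : i < L := by
      have := hi; simp only [List.length_take] at this; omega
    have hilen : i < removed.length := by
      have := hi; simp only [List.length_take] at this; omega
    rw [← hval, List.getElem_take]
    exact le_of_lt (hsp1 i hilen hiL)
  have hdr : ∀ a ∈ removed.drop L, p ≤ a := by
    intro a ha
    obtain ⟨i, hi, hval⟩ := List.getElem_of_mem ha
    have hilen : L + i < removed.length := by
      have := hi; simp only [List.length_drop] at this; omega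
    rw [← hval, List.getElem_drop]
    have := hsp2 (L + i) hilen (by omega)
    omega
  rw [List.pairwise_append]
  refine ⟨hs.sublist (List.take_sublist _ _), ?_, ?_⟩
  · rw [List.pairwise_cons]
    exact ⟨hdr, hs.sublist (List.drop_sublist _ _)⟩
  · intro a ha b hb
    rcases List.mem_cons.mp hb with h1 | h1
    · subst h1; exact htk a ha
    · exact le_trans (htk a ha) (hdr b h1)

lemma pvCountInsert (removed : List Int) (p b : Int) (L : Nat) :
    (removed.take L ++ p :: removed.drop L).countP (fun x => decide (x < b))
      = removed.countP (fun x => decide (x < b)) + if p < b then 1 else 0 := by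
  rw [List.countP_append, List.countP_cons]
  have h1 : (removed.take L).countP (fun x => decide (x < b))
        + (removed.drop L).countP (fun x => decide (x < b))
      = removed.countP (fun x => decide (x < b)) := by
    rw [← List.countP_append, List.take_append_drop]
  by_cases hp : p < b
  · simp [hp]; omega
  · simp [hp]; omega

set_option maxHeartbeats 1000000 in
lemma pvMain (orig : List Int) (rest : List Int) :
    ∀ (pre : List Int) (rem : List (Int × Int)) (taken : PySem.Dict Int Int)
      (removed out : List Int),
    (∀ v, pre.count v + rest.count v ≤ orig.count v) →
    rem.Sublist (PySem.List.enumerate orig 0) →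
    (∀ v, taken.getD v 0 = (pre.count v : Int)) →
    (∀ v, rem.filter (fun q => q.2 == v)
        = ((PySem.List.enumerate orig 0).filter (fun q => q.2 == v)).drop (pre.count v)) →
    removed.Pairwise (· ≤ ·) →
    (∀ b : Int, (removed.countP (· < b) : Int)
        = (((PySem.List.enumerate orig 0).countP (fun q => q.1 < b)) : Int)
          - ((rem.countP (fun q => q.1 < b)) : Int)) →
    (rest.foldl pvStepA (out, rem.map (·.2))).1
      = (rest.foldl (pvStepB (pvPosDict orig)) (out, taken, removed)).1 := by
  induction rest with
  | nil => intros; rfl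
  | cons n rest ih =>
    intro pre rem taken removed out hav hsub htaken hqueue hsorted hrm
    have hcF : pre.count n <
        ((PySem.List.enumerate orig 0).filter (fun q => q.2 == n)).length := by
      rw [← pvCountOrig]
      have := hav n
      rw [List.count_cons] at this
      simp at this
      omega
    set E := PySem.List.enumerate orig 0 with hE
    set F := E.filter (fun q => q.2 == n) with hF
    set c := pre.count n with hc
    -- the matched pair
    have hFc : F.drop c = F[c] :: F.drop (c+1) := List.drop_eq_getElem_cons hcF
    have hFcF : F[c] ∈ F := List.getElem_mem hcF
    have hFcE : F[c] ∈ E := List.mem_of_mem_filter hFcF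
    have hval : F[c].2 = n := by
      have := List.of_mem_filter hFcF
      simpa using this
    obtain ⟨k, hkorig, hpk⟩ := (PySem.List.mem_enumerate_iff orig 0 F[c]).mp hFcE
    have hp1 : F[c].1 = (k : Int) := by rw [hpk]; simp
    -- decompose rem around the first n-pair
    have hqn := hqueue n
    rw [hFc] at hqn
    obtain ⟨l₁, l₂, hremEq, hl₁, _, hl₂f⟩ := List.filter_eq_cons_iff.mp hqn
    -- pairwise positions
    have hpw : rem.Pairwise (fun a b => a.1 < b.1) :=
      (PySem.List.pairwise_lt_enumerate orig 0).sublist hsub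
    rw [hremEq] at hpw
    rw [List.pairwise_append] at hpw
    obtain ⟨hpw1, hpw2, hpw12⟩ := hpw
    have hl₁lt : ∀ a ∈ l₁, a.1 < F[c].1 := by
      intro a ha
      exact hpw12 a ha F[c] List.mem_cons_self
    have hl₂gt : ∀ b ∈ l₂, F[c].1 < b.1 := by
      have := List.pairwise_cons.mp hpw2
      exact this.1
    -- count of rem below p is l₁.length
    have hremCount : rem.countP (fun q => decide (q.1 < F[c].1)) = l₁.length := by
      rw [hremEq, List.countP_append, List.countP_cons]
      have h1 : l₁.countP (fun q => decide (q.1 < F[c].1)) = l₁.length :=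
        List.countP_eq_length.mpr (by intro a ha; simpa using hl₁lt a ha)
      have h2 : l₂.countP (fun q => decide (q.1 < F[c].1)) = 0 :=
        List.countP_eq_zero.mpr (by intro a ha; simp; exact le_of_lt (hl₂gt a ha))
      simp [h1, h2]
    -- A's index
    have hvals : rem.map (·.2) = l₁.map (·.2) ++ n :: l₂.map (·.2) := by
      rw [hremEq]; simp [hval]
    have hnotin : n ∉ l₁.map (·.2) := by
      intro hmem
      obtain ⟨a, ha, hav2⟩ := List.mem_map.mp hmem
      have := hl₁ a ha
      simp [hav2] at this
    have hidx : PySem.List.index? (rem.map (·.2)) n = some l₁.length := by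
      rw [PySem.List.index?_eq_some_iff]
      refine ⟨l₁.map (·.2), l₂.map (·.2), hvals, ?_, hnotin⟩
      all_goals simp
    -- A's step
    have hlen : l₁.length < (rem.map (·.2)).length := by
      rw [hvals]; simp
    have hstepA : pvStepA (out, rem.map (·.2)) n
        = (out ++ [(l₁.length : Int)], (l₁ ++ l₂).map (·.2)) := by
      unfold pvStepA
      rw [hidx]
      simp only [Option.getD_some]
      rw [PySem.List.pop?_natCast _ _ hlen]
      simp only [Option.map_some, Option.getD_some]
      rw [hvals]
      have h := pvEraseIdxAppend (fun x : Int × Int => x.2) l₁ l₂ n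
      rw [List.map_append, h]
    -- B's p
    have hpos : (pvPosDict orig).getD n [] = F.map (·.1) := by
      rw [pvPosDict_getD]
    have hcltF : c < (F.map (·.1)).length := by simpa using hcF
    have hpB : PySem.List.pyGetD ((pvPosDict orig).getD n []) ((c : Nat) : Int) 0 = F[c].1 := by
      rw [hpos, PySem.List.pyGetD_natCast, List.getD_eq_getElem _ _ hcltF]
      simp
    -- B's removed count
    have hkE : E.countP (fun q => decide (q.1 < (k : Int))) = k := by
      rw [hE]; exact pvCountEnumLt orig k (le_of_lt hkorig)
    have hrmP : ((removed.countP (· < F[c].1)) : Int) = (k : Int) - (l₁.length : Int) := by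
      have := hrm F[c].1
      rw [hremCount] at this
      rw [this, hp1, hkE]
    have hLlen : removed.countP (fun x => decide (x < F[c].1)) ≤ removed.length :=
      List.countP_le_length
    have hstepB : pvStepB (pvPosDict orig) (out, taken, removed) n
        = (out ++ [(l₁.length : Int)], taken.insert n ((c : Int) + 1),
           removed.take (removed.countP (fun x => decide (x < F[c].1)))
             ++ F[c].1 :: removed.drop (removed.countP (fun x => decide (x < F[c].1)))) := by
      unfold pvStepB
      simp only [htaken n, ← hc]
      rw [hpB, pvBisect_full removed F[c].1 hsorted,
          PySem.List.insert_natCast removed _ _ hLlen]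
      have harith : F[c].1 - ((removed.countP (fun x => decide (x < F[c].1)) : Nat) : Int)
          = (l₁.length : Int) := by
        rw [hrmP, hp1]; ring
      rw [harith]
    rw [List.foldl_cons, List.foldl_cons, hstepA, hstepB]
    -- apply ih
    apply ih (pre ++ [n]) (l₁ ++ l₂) (taken.insert n ((c : Int) + 1))
      (removed.take (removed.countP (fun x => decide (x < F[c].1)))
        ++ F[c].1 :: removed.drop (removed.countP (fun x => decide (x < F[c].1))))
    · -- availability
      intro v
      have h := hav v
      rw [List.count_cons] at h
      rw [List.count_append, List.count_cons, List.count_nil]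
      split_ifs at h ⊢ <;> omega
    · -- sublist
      have h1 : (l₁ ++ l₂).Sublist rem := by
        rw [hremEq]
        exact (List.sublist_cons_self _ _).append_left l₁
      exact h1.trans hsub
    · -- taken
      intro v
      rw [PySem.Dict.getD_insert]
      by_cases hv : v = n
      · subst hv
        rw [if_pos rfl]
        have h2 : List.count v (pre ++ [v]) = c + 1 := by
          rw [List.count_append, ← hc]; simp
        rw [h2]
        push_cast
        ring
      · rw [if_neg hv, htaken v]
        have h2 : List.count v (pre ++ [n]) = List.count v pre := by
          rw [List.count_append]
          have hb : (n == v) = false := by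
            simp only [beq_eq_false_iff_ne, ne_eq]
            intro h; exact hv h.symm
          simp [List.count_cons, hb]
        rw [h2]
    · -- queue
      intro v
      rw [List.filter_append, List.count_append]
      by_cases hv : v = n
      · subst hv
        have h1 : l₁.filter (fun q => q.2 == v) = [] := List.filter_eq_nil_iff.mpr hl₁
        rw [h1, hl₂f, List.nil_append]
        have h2 : List.count v [v] = 1 := by simp
        rw [h2, ← hc]
      · have h1 : rem.filter (fun q => q.2 == v)
            = l₁.filter (fun q => q.2 == v) ++ l₂.filter (fun q => q.2 == v) := by
          rw [hremEq, List.filter_append, List.filter_cons]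
          have : (F[c].2 == v) = false := by rw [hval]; simp; intro h; exact hv h.symm
          simp [this]
        have h2 : List.count v [n] = 0 := by
          have hb : (n == v) = false := by
            simp only [beq_eq_false_iff_ne, ne_eq]
            intro h; exact hv h.symm
          simp [List.count_cons, hb]
        rw [← h1, h2, hqueue v, Nat.add_zero]
    · -- sorted
      exact pvInsertSorted removed F[c].1 hsorted
    · -- removed count
      intro b
      rw [pvCountInsert, List.countP_append]
      have hremb := hrm b
      rw [hremEq, List.countP_append, List.countP_cons] at hremb
      push_cast at *
      by_cases hb : F[c].1 < b
      · simp [hb] at *; omega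
      · simp [hb] at *; omega

lemma pvA_eq (route original_order : List Int) :
    generate_ordinal_tour route original_order
      = (route.foldl pvStepA ([], original_order)).1 := rfl

lemma pvB_eq (route original_order : List Int) :
    generate_ordinal_tour_alt route original_order
      = (route.foldl (pvStepB (pvPosDict original_order)) ([], PySem.Dict.empty, [])).1 := rfl

-- ===== VERDICT (by name: the statement is the Claim_ definition above) =====
theorem generate_ordinal_tour_spec : Claim_equal_generate_ordinal_tour := by
  intro route orig _hdom hpre
  unfold Spec_generate_ordinal_tour
  rw [pvA_eq, pvB_eq]
  have h := pvMain orig route [] (PySem.List.enumerate orig 0) PySem.Dict.empty [] []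
    (by
      intro v
      simp only [List.count_nil, Nat.zero_add]
      by_cases hv : v ∈ route
      · exact hpre v hv
      · rw [List.count_eq_zero_of_not_mem hv]
        exact Nat.zero_le _)
    (List.Sublist.refl _)
    (by intro v; simp [PySem.Dict.getD_empty])
    (by intro v; simp)
    List.Pairwise.nil
    (by intro b; simp)
  rw [PySem.List.map_snd_enumerate] at h
  exact h
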